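-- pv_equiv track=rewrite | github.com/stefsoliveira/probcomp-1 | loboMau.py | findWolvesOnPastures
-- ===== SOURCE A (Python) =====
-- def findWolvesOnPastures(pastures, wolves):
--     wolvesOnPastures = [0] * len(pastures)
--     for pasture in range(len(pastures)):
--         for coordinate in range(len(pastures[pasture])):
--             for wolf in range(len(wolves)):
--                 if pastures[pasture][coordinate] == wolves[wolf]:
--                     wolvesOnPastures[pasture] = wolvesOnPastures[pasture] + 1
--     return wolvesOnPastures
-- ===== SOURCE B (Python) =====
-- def findWolvesOnPastures(pastures, wolves):
--     # Inverted index: coordinate value -> list of pasture indices (with multiplicity).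
--     index = {}
--     for p, pasture in enumerate(pastures):
--         for c in pasture:
--             index.setdefault(c, []).append(p)
--     result = [0] * len(pastures)
--     for w in wolves:
--         for p in index.get(w, []):
--             result[p] += 1
--     return result
-- ===== Notes on version B (the rewrite author's own statement) =====
-- stated objective: alternative
-- what changed: Reverses the traversal: first builds an inverted index from coordinate value to the pasture indices containing it (with multiplicity), then drives the count with an outer loop over the wolves, incrementing result[p] for each indexed hit, instead of A's triple nested index loop scanning all wolves per coordinate.
import Mathlib
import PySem

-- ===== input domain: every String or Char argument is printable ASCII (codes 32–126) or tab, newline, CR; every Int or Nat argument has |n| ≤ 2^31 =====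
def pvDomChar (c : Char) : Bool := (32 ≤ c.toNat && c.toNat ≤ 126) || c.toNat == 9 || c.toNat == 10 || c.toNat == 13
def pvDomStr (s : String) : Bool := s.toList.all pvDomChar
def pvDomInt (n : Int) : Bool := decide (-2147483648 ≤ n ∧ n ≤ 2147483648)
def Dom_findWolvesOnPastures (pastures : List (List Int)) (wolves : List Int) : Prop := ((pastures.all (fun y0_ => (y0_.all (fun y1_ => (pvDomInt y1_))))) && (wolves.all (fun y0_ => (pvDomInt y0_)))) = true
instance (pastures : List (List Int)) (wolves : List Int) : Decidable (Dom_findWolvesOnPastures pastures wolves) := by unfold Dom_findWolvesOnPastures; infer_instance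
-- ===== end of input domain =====

-- B reverses the traversal: it builds an inverted index from coordinate value to pasture indices, then an outer loop over the wolves increments result[p] per indexed hit (a different algorithm from A's triple nested loop; same result).


-- ===== PORT A =====
def findWolvesOnPastures (pastures : List (List Int)) (wolves : List Int) : List Int :=
  let init : List Int := List.replicate pastures.length 0
  (PySem.List.pyRange 0 (pastures.length : Int) 1).foldl (fun acc p =>
    (PySem.List.pyRange 0 ((PySem.List.pyGetD pastures p []).length : Int) 1).foldl (fun acc c =>
      (PySem.List.pyRange 0 (wolves.length : Int) 1).foldl (fun acc w =>
        if PySem.List.pyGetD (PySem.List.pyGetD pastures p []) c 0 = PySem.List.pyGetD wolves w 0 then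
          acc.set p.toNat (PySem.List.pyGetD acc p 0 + 1)
        else acc) acc) acc) init

-- ===== PORT B =====
-- inverted index: value -> pasture indices (with multiplicity); setdefault(c, []).append(p) = modify c [] (· ++ [p])
def findWolvesOnPastures_alt (pastures : List (List Int)) (wolves : List Int) : List Int :=
  let index : PySem.Dict Int (List Int) :=
    (PySem.List.enumerate pastures 0).foldl (fun d pp =>
      pp.2.foldl (fun d c => d.modify c [] (· ++ [pp.1])) d) PySem.Dict.empty
  let init : List Int := List.replicate pastures.length 0
  wolves.foldl (fun res w =>
    (index.getD w []).foldl (fun res p =>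
      res.set p.toNat (PySem.List.pyGetD res p 0 + 1)) res) init

-- ===== PRECONDITION & SPEC =====
def Spec_findWolvesOnPastures (pastures : List (List Int)) (wolves : List Int) (out : List Int) : Prop := out = findWolvesOnPastures_alt pastures wolves
instance (pastures : List (List Int)) (wolves : List Int) (out : List Int) : Decidable (Spec_findWolvesOnPastures pastures wolves out) := by unfold Spec_findWolvesOnPastures; infer_instance

-- ===== CLAIM =====
def Claim_equal_findWolvesOnPastures : Prop := ∀ (pastures : List (List Int)) (wolves : List Int), Dom_findWolvesOnPastures pastures wolves → Spec_findWolvesOnPastures pastures wolves (findWolvesOnPastures pastures wolves)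

-- ===== LEMMAS AND PROOFS =====

-- the per-pasture score both programs compute: sum over coordinates of the wolf multiplicity
def pvScore (wolves : List Int) (pa : List Int) : Int :=
  (pa.map (fun c => (wolves.count c : Int))).sum

-- ---------- A side (A = pastures.map (pvScore wolves)) ----------

def pvBody (wolves : List Int) (pastures : List (List Int)) (acc : List Int) (p : Int) : List Int :=
  (PySem.List.pyRange 0 ((PySem.List.pyGetD pastures p []).length : Int) 1).foldl (fun acc c =>
    (PySem.List.pyRange 0 (wolves.length : Int) 1).foldl (fun acc w =>
      if PySem.List.pyGetD (PySem.List.pyGetD pastures p []) c 0 = PySem.List.pyGetD wolves w 0 then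
        acc.set p.toNat (PySem.List.pyGetD acc p 0 + 1)
      else acc) acc) acc

lemma pvGetD_set_self (acc : List Int) (pn : Nat) (x : Int) (h : pn < acc.length) :
    PySem.List.pyGetD (acc.set pn x) (pn : Int) 0 = x := by
  rw [PySem.List.pyGetD_natCast]
  simp [List.getD_eq_getElem?_getD, h]

lemma pvInner (v : Int) (pn : Nat) :
    ∀ (ws acc : List Int), pn < acc.length →
    ws.foldl (fun acc w => if v = w then acc.set pn (PySem.List.pyGetD acc (pn : Int) 0 + 1) else acc) acc
      = acc.set pn (PySem.List.pyGetD acc (pn : Int) 0 + (ws.count v : Int)) := by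
  intro ws
  induction ws with
  | nil =>
      intro acc h
      rw [PySem.List.pyGetD_natCast]
      simp [List.getD_eq_getElem?_getD, List.getElem?_eq_getElem h, List.set_getElem_self]
  | cons w ws ih =>
      intro acc h
      simp only [List.foldl_cons]
      by_cases hv : v = w
      · subst hv
        rw [if_pos rfl, ih _ (by simpa using h), pvGetD_set_self _ _ _ h, List.set_set,
          List.count_cons_self]
        congr 1
        push_cast
        ring
      · rw [if_neg hv, ih _ h, List.count_cons_of_ne (Ne.symm hv)]

lemma pvMid (wolves : List Int) (pn : Nat) :
    ∀ (row : List Int) (acc : List Int), pn < acc.length →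
    row.foldl (fun acc v => wolves.foldl (fun acc w => if v = w then acc.set pn (PySem.List.pyGetD acc (pn : Int) 0 + 1) else acc) acc) acc
      = acc.set pn (PySem.List.pyGetD acc (pn : Int) 0 + pvScore wolves row) := by
  intro row
  induction row with
  | nil =>
      intro acc h
      rw [PySem.List.pyGetD_natCast]
      simp [pvScore, List.getD_eq_getElem?_getD, List.getElem?_eq_getElem h, List.set_getElem_self]
  | cons v rest ih =>
      intro acc h
      simp only [List.foldl_cons]
      rw [pvInner v pn wolves acc h, ih _ (by simpa using h), pvGetD_set_self _ _ _ h, List.set_set]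
      congr 1
      simp [pvScore]
      ring

lemma pvBody_eq (wolves : List Int) (pastures : List (List Int)) (k : Nat) (acc : List Int)
    (h : k < acc.length) :
    pvBody wolves pastures acc (k : Int)
      = acc.set k (PySem.List.pyGetD acc (k : Int) 0 + pvScore wolves (pastures.getD k [])) := by
  unfold pvBody
  rw [PySem.List.pyGetD_natCast pastures k]
  simp only [Int.toNat_natCast]
  refine Eq.trans
    (PySem.List.foldl_pyRange_zero_pyGetD' (pastures.getD k []) 0
      (fun acc v =>
        (PySem.List.pyRange 0 (wolves.length : Int) 1).foldl
          (fun acc w =>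
            if v = PySem.List.pyGetD wolves w 0 then
              acc.set k (PySem.List.pyGetD acc (k : Int) 0 + 1)
            else acc) acc) acc) ?_
  refine Eq.trans
    (PySem.List.foldl_congr_mem (pastures.getD k []) _
      (fun acc v => wolves.foldl
        (fun acc w => if v = w then acc.set k (PySem.List.pyGetD acc (k : Int) 0 + 1) else acc) acc)
      acc
      (fun acc v _ =>
        PySem.List.foldl_pyRange_zero_pyGetD' wolves 0
          (fun acc w => if v = w then acc.set k (PySem.List.pyGetD acc (k : Int) 0 + 1) else acc)
          acc)) ?_
  exact pvMid wolves k (pastures.getD k []) acc h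

lemma pvOuter (wolves : List Int) (pastures : List (List Int)) :
    ∀ (k : Nat), k ≤ pastures.length →
    (PySem.List.pyRange 0 (k : Int) 1).foldl (pvBody wolves pastures) (List.replicate pastures.length 0)
      = (pastures.take k).map (pvScore wolves) ++ List.replicate (pastures.length - k) (0 : Int) := by
  intro k
  induction k with
  | zero => intro _; simp [PySem.List.pyRange]
  | succ k ih =>
      intro hk
      have hk' : k < pastures.length := Nat.lt_of_succ_le hk
      have hcast : ((k + 1 : Nat) : Int) = (k : Int) + 1 := by push_cast; ring
      rw [hcast, PySem.List.pyRange_one_succ_right (by positivity), List.foldl_append]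
      rw [ih (Nat.le_of_lt hk')]
      set acc := (pastures.take k).map (pvScore wolves) ++ List.replicate (pastures.length - k) (0 : Int) with hacc
      have hpre : ((pastures.take k).map (pvScore wolves)).length = k := by
        simp [Nat.min_eq_left (Nat.le_of_lt hk')]
      have hlen : acc.length = pastures.length := by
        simp [hacc, Nat.min_eq_left (Nat.le_of_lt hk')]
        omega
      simp only [List.foldl_cons, List.foldl_nil]
      rw [pvBody_eq wolves pastures k acc (by rw [hlen]; exact hk')]
      have hgk : PySem.List.pyGetD acc (k : Int) 0 = 0 := by
        rw [PySem.List.pyGetD_natCast, hacc]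
        rw [List.getD_eq_getElem?_getD, List.getElem?_append_right (by rw [hpre])]
        rw [hpre, Nat.sub_self]
        have : 0 < pastures.length - k := by omega
        simp [this]
      rw [hgk, zero_add]
      have htake : pastures.take (k + 1) = pastures.take k ++ [pastures[k]] := by
        rw [List.take_add_one, List.getElem?_eq_getElem hk']
        rfl
      have hgd : pastures.getD k [] = pastures[k] := by
        rw [List.getD_eq_getElem?_getD, List.getElem?_eq_getElem hk']
        rfl
      rw [hacc, hgd]
      rw [List.set_append_right _ _ (by rw [hpre])]
      rw [hpre, Nat.sub_self]
      have hlt : (pastures.length - k) = (pastures.length - (k + 1)) + 1 := by omega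
      rw [hlt, List.replicate_succ, List.set_cons_zero, htake, List.map_append]
      simp

lemma pvA_eq (pastures : List (List Int)) (wolves : List Int) :
    findWolvesOnPastures pastures wolves = pastures.map (pvScore wolves) := by
  have h0 : findWolvesOnPastures pastures wolves
      = (PySem.List.pyRange 0 (pastures.length : Int) 1).foldl (pvBody wolves pastures)
          (List.replicate pastures.length 0) := rfl
  rw [h0, pvOuter wolves pastures pastures.length (le_refl _)]
  simp

-- ---------- B side (B = pastures.map (pvScore wolves)) ----------

lemma pvFiltRep (l : List Int) (v p : Int) :
    ((l.map (fun c => (c, p))).filter (fun q => q.1 == v)).map (·.2)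
      = List.replicate (l.count v) p := by
  rw [List.filter_map, List.map_map]
  simp [Function.comp_def, List.map_const']
  rw [List.count_eq_length_filter]

lemma pvIndexGetD_aux (v : Int) :
    ∀ (l : List (Int × List Int)) (d : PySem.Dict Int (List Int)),
    (l.foldl (fun d pp => pp.2.foldl (fun d c => d.modify c [] (· ++ [pp.1])) d) d).getD v []
      = d.getD v [] ++ l.flatMap (fun pp => List.replicate (pp.2.count v) pp.1) := by
  intro l
  induction l with
  | nil => intro d; simp
  | cons pp l ih =>
      intro d
      simp only [List.foldl_cons, List.flatMap_cons]
      rw [ih]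
      have hinner : pp.2.foldl (fun d c => d.modify c [] (· ++ [pp.1])) d
          = (pp.2.map (fun c => (c, pp.1))).foldl (fun d q => d.modify q.1 [] (· ++ [q.2])) d := by
        rw [List.foldl_map]
      rw [hinner, PySem.Dict.getD_foldl_modify_append, pvFiltRep, List.append_assoc]

def pvIndex (pastures : List (List Int)) : PySem.Dict Int (List Int) :=
  (PySem.List.enumerate pastures 0).foldl (fun d pp =>
    pp.2.foldl (fun d c => d.modify c [] (· ++ [pp.1])) d) PySem.Dict.empty

lemma pvIndexGetD (pastures : List (List Int)) (v : Int) :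
    (pvIndex pastures).getD v []
      = (PySem.List.enumerate pastures 0).flatMap
          (fun pp => List.replicate (pp.2.count v) pp.1) := by
  rw [pvIndex, pvIndexGetD_aux]
  simp

lemma pvFlatMem (v : Int) (ps : List (List Int)) (s x : Int)
    (hx : x ∈ (PySem.List.enumerate ps s).flatMap (fun pp => List.replicate (pp.2.count v) pp.1)) :
    ∃ k : Nat, k < ps.length ∧ x = s + (k : Int) := by
  rcases List.mem_flatMap.1 hx with ⟨pp, hpp, hxr⟩
  rcases (PySem.List.mem_enumerate_iff ps s pp).1 hpp with ⟨k, hk, rfl⟩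
  exact ⟨k, hk, List.eq_of_mem_replicate hxr⟩

lemma pvFlatCount (v : Int) :
    ∀ (ps : List (List Int)) (s : Int) (j : Nat), (hj : j < ps.length) →
    ((PySem.List.enumerate ps s).flatMap (fun pp => List.replicate (pp.2.count v) pp.1)).count (s + (j : Int))
      = ps[j].count v := by
  intro ps
  induction ps with
  | nil => intro s j hj; simp at hj
  | cons pa ps ih =>
      intro s j hj
      rw [PySem.List.enumerate_cons, List.flatMap_cons, List.count_append]
      cases j with
      | zero =>
          have h2 : (s : Int) + ((0:Nat) : Int) ∉ (PySem.List.enumerate ps (s+1)).flatMap (fun pp => List.replicate (pp.2.count v) pp.1) := by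
            intro hmem
            rcases pvFlatMem v ps (s+1) _ hmem with ⟨k, _, hk⟩
            omega
          rw [List.count_eq_zero.2 h2]
          simp
      | succ k =>
          have h1 : List.count (s + ((k:Int)+1)) (List.replicate (pa.count v) s) = 0 := by
            rw [List.count_replicate]
            simp
            omega
          have hcast : s + ((k + 1 : Nat) : Int) = (s + 1) + (k : Int) := by push_cast; ring
          rw [hcast]
          rw [show List.count ((s+1) + (k:Int)) (List.replicate (pa.count v) s) = 0 from by
            rw [List.count_replicate]; simp; omega]
          rw [ih (s+1) k (by simpa using hj)]
          simp

lemma pvAddAt_len :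
    ∀ (ixs : List Int) (acc : List Int),
    (ixs.foldl (fun res p => res.set p.toNat (PySem.List.pyGetD res p 0 + 1)) acc).length = acc.length := by
  intro ixs
  induction ixs with
  | nil => intro acc; rfl
  | cons p ixs ih => intro acc; simp only [List.foldl_cons]; rw [ih, List.length_set]

lemma pvGetD_set (acc : List Int) (k j : Nat) (x : Int) (hj : j < acc.length) :
    PySem.List.pyGetD (acc.set k x) (j : Int) 0
      = if j = k then x else PySem.List.pyGetD acc (j : Int) 0 := by
  rw [PySem.List.pyGetD_natCast, PySem.List.pyGetD_natCast]
  by_cases h : j = k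
  · subst h
    simp [List.getD_eq_getElem?_getD, hj]
  · simp [List.getD_eq_getElem?_getD, List.getElem?_set_ne (fun hh => h hh.symm), h]

lemma pvAddAt_getD :
    ∀ (ixs : List Int) (acc : List Int),
    (∀ x ∈ ixs, ∃ k : Nat, x = (k : Int) ∧ k < acc.length) →
    ∀ (j : Nat), j < acc.length →
    PySem.List.pyGetD (ixs.foldl (fun res p => res.set p.toNat (PySem.List.pyGetD res p 0 + 1)) acc) (j : Int) 0
      = PySem.List.pyGetD acc (j : Int) 0 + (ixs.count (j : Int) : Int) := by
  intro ixs
  induction ixs with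
  | nil => intro acc _ j hj; simp
  | cons p ixs ih =>
      intro acc hmem j hj
      rcases hmem p (List.mem_cons_self) with ⟨k, rfl, hk⟩
      simp only [List.foldl_cons, Int.toNat_natCast]
      rw [ih _ (fun x hx => by
            rcases hmem x (List.mem_cons_of_mem _ hx) with ⟨m, hm, hml⟩
            exact ⟨m, hm, by simpa using hml⟩)
          j (by simpa using hj)]
      rw [pvGetD_set acc k j _ hj]
      rw [List.count_cons]
      by_cases h : j = k
      · subst h
        simp
        ring
      · have h1 : (((k:Int)) == ((j:Int))) = false := by
          simp
          omega
        rw [h1]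
        simp [h]

lemma pvExchange (ws pa : List Int) :
    (ws.map (fun w => (pa.count w : Int))).sum = (pa.map (fun c => (ws.count c : Int))).sum := by
  induction ws with
  | nil => simp
  | cons w ws ih =>
      simp only [List.map_cons, List.sum_cons]
      rw [ih]
      have hc : ∀ c : Int, ((w :: ws).count c : Int) = (if c == w then (1:Int) else 0) + (ws.count c : Int) := by
        intro c
        rw [List.count_cons]
        by_cases h : c = w
        · subst h; simp; ring
        · have hb : ((c == w) : Bool) = false := by simp [h]
          rw [hb]
          simp [Ne.symm h]
      calc (pa.count w : Int) + (pa.map (fun c => (ws.count c : Int))).sum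
          = (pa.map (fun c => (if c == w then (1:Int) else 0))).sum + (pa.map (fun c => (ws.count c : Int))).sum := by
            rw [PySem.List.sum_map_ite_one_zero]
            congr 2
        _ = (pa.map (fun c => ((w :: ws).count c : Int))).sum := by
            rw [← PySem.List.sum_map_add_int]
            exact congrArg List.sum (List.map_congr_left (fun c _ => (hc c).symm))

lemma pvBucketMem (pastures : List (List Int)) (v x : Int)
    (hx : x ∈ (pvIndex pastures).getD v []) :
    ∃ k : Nat, x = (k : Int) ∧ k < pastures.length := by
  rw [pvIndexGetD] at hx
  rcases pvFlatMem v pastures 0 x hx with ⟨k, hk, hxe⟩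
  exact ⟨k, by omega, hk⟩

lemma pvBucketCount (pastures : List (List Int)) (v : Int) (j : Nat) (hj : j < pastures.length) :
    ((pvIndex pastures).getD v []).count (j : Int) = pastures[j].count v := by
  rw [pvIndexGetD]
  have := pvFlatCount v pastures 0 j hj
  simpa using this

lemma pvWolvesLen (pastures : List (List Int)) :
    ∀ (ws : List Int) (res : List Int),
    (ws.foldl (fun res w => ((pvIndex pastures).getD w []).foldl
        (fun res p => res.set p.toNat (PySem.List.pyGetD res p 0 + 1)) res) res).length = res.length := by
  intro ws
  induction ws with
  | nil => intro res; rfl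
  | cons w ws ih => intro res; simp only [List.foldl_cons]; rw [ih, pvAddAt_len]

lemma pvWolvesGetD (pastures : List (List Int)) :
    ∀ (ws : List Int) (res : List Int), res.length = pastures.length →
    ∀ (j : Nat), j < pastures.length →
    PySem.List.pyGetD (ws.foldl (fun res w => ((pvIndex pastures).getD w []).foldl
        (fun res p => res.set p.toNat (PySem.List.pyGetD res p 0 + 1)) res) res) (j : Int) 0
      = PySem.List.pyGetD res (j : Int) 0
        + (ws.map (fun w => ((pastures.getD j []).count w : Int))).sum := by
  intro ws
  induction ws with
  | nil => intro res _ j _; simp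
  | cons w ws ih =>
      intro res hlen j hj
      simp only [List.foldl_cons, List.map_cons, List.sum_cons]
      rw [ih _ (by rw [pvAddAt_len]; exact hlen) j hj]
      rw [pvAddAt_getD _ res
        (fun x hx => by
          rcases pvBucketMem pastures w x hx with ⟨k, hk, hkl⟩
          exact ⟨k, hk, by omega⟩)
        j (by omega)]
      rw [pvBucketCount pastures w j hj]
      have : pastures.getD j [] = pastures[j] := by
        rw [List.getD_eq_getElem?_getD, List.getElem?_eq_getElem hj]
        rfl
      rw [this]
      ring

lemma pvB_eq (pastures : List (List Int)) (wolves : List Int) :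
    findWolvesOnPastures_alt pastures wolves = pastures.map (pvScore wolves) := by
  have h0 : findWolvesOnPastures_alt pastures wolves
      = wolves.foldl (fun res w => ((pvIndex pastures).getD w []).foldl
          (fun res p => res.set p.toNat (PySem.List.pyGetD res p 0 + 1)) res)
          (List.replicate pastures.length 0) := rfl
  rw [h0]
  apply List.ext_getElem
  · exact (pvWolvesLen pastures wolves (List.replicate pastures.length (0:Int))).trans (by simp)
  · intro j h1 h2
    have hlen : (wolves.foldl (fun res w => ((pvIndex pastures).getD w []).foldl
          (fun res p => res.set p.toNat (PySem.List.pyGetD res p 0 + 1)) res)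
          (List.replicate pastures.length (0:Int))).length = pastures.length :=
      (pvWolvesLen pastures wolves (List.replicate pastures.length (0:Int))).trans (by simp)
    have hj : j < pastures.length := by rw [hlen] at h1; exact h1
    have hL : ∀ (l : List Int) (h : j < l.length), l[j]'h = PySem.List.pyGetD l (j : Int) 0 := by
      intro l h
      rw [PySem.List.pyGetD_natCast]
      simp [List.getD_eq_getElem?_getD, List.getElem?_eq_getElem h]
    rw [hL _ h1, pvWolvesGetD pastures wolves _ (by simp) j hj]
    have hz : PySem.List.pyGetD (List.replicate pastures.length (0:Int)) (j:Int) 0 = 0 := by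
      rw [PySem.List.pyGetD_natCast]
      simp [List.getD_eq_getElem?_getD, hj]
    rw [hz, zero_add]
    have hgd : pastures.getD j [] = pastures[j] := by
      rw [List.getD_eq_getElem?_getD, List.getElem?_eq_getElem hj]
      rfl
    rw [hgd, pvExchange]
    simp [pvScore]

-- ===== VERDICT =====
theorem findWolvesOnPastures_spec : Claim_equal_findWolvesOnPastures := by
  intro pastures wolves _
  unfold Spec_findWolvesOnPastures
  rw [pvA_eq, pvB_eq]
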